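-- pv_equiv track=rewrite | github.com/psphicas/olive-gui | legacy/common.py | tuples
-- ===== SOURCE A (Python) =====
-- def tuples(seq, n, with_permutations):
--     if(n > len(seq)):
--         return
--     if n == 1:
--         for e in seq:
--             yield [e]
--     else:
--         for i in range(len(seq)):
--             if with_permutations:
--                 for tail in tuples(seq[:i]+seq[i+1:], n-1, True):
--                     yield [seq[i]]+tail
--             else:
--                 for tail in tuples(seq[i+1:], n-1, False):
--                     yield [seq[i]]+tail
-- ===== SOURCE B (Python) =====
-- import itertools
--
-- def tuples(seq, n, with_permutations):
--     if n < 1 or n > len(seq):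
--         return
--     it = itertools.permutations(seq, n) if with_permutations else itertools.combinations(seq, n)
--     for t in it:
--         yield list(t)
-- ===== Notes on version B (the rewrite author's own statement) =====
-- stated objective: idiomatic
-- what changed: Replaced the hand-rolled recursive slicing generator with itertools.permutations/combinations (plus an n<1 guard so degenerate n yields nothing, as A does).
import Mathlib
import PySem

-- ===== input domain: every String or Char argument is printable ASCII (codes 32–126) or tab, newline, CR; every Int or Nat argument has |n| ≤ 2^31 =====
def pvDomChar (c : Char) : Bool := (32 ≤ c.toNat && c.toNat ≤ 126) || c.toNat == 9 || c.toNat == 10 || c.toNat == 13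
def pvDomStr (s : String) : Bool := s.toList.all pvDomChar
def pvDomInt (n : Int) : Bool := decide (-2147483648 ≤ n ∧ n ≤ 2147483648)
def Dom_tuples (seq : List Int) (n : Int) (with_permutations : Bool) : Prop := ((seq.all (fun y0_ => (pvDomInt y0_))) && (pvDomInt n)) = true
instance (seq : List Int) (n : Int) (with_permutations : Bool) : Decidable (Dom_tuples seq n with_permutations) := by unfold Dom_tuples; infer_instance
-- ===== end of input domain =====

-- B replaces A's hand-rolled recursive slicing generator with the idiomatic itertools
-- permutations/combinations (guarded by n < 1 so degenerate n yields nothing, as A does);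
-- equivalence is about the returned list of tuples.


-- ===== PORT A =====
-- two length facts about Python's slices, cited by the port's decreasing_by (A recurses on strictly shorter lists)
theorem pv_len_remove (seq : List Int) (i : Nat) (hi : i < seq.length) :
    (PySem.List.slice seq none (some (i : Int)) ++
      PySem.List.slice seq (some ((i : Int) + 1)) none).length < seq.length := by
  rw [PySem.List.slice_to seq (by positivity), PySem.List.slice_from seq (by positivity)]
  simp
  omega

theorem pv_len_tail (seq : List Int) (i : Nat) (hi : i < seq.length) :
    (PySem.List.slice seq (some ((i : Int) + 1)) none).length < seq.length := by
  rw [PySem.List.slice_from seq (by positivity)]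
  simp
  omega

-- A, step for step: guard n > len(seq); base n == 1; else loop i over range(len(seq)),
-- recursing on seq[:i]+seq[i+1:] (permutations) or seq[i+1:] (combinations).
-- (.attach only carries the 'i ∈ range' fact for the termination proof.)
def tuples (seq : List Int) (n : Int) (with_permutations : Bool) : List (List Int) :=
  if n > (seq.length : Int) then []
  else if n = 1 then seq.map (fun e => [e])
  else
    (List.range seq.length).attach.flatMap (fun im =>
      if with_permutations then
        (tuples (PySem.List.slice seq none (some (im.1 : Int)) ++
                 PySem.List.slice seq (some ((im.1 : Int) + 1)) none) (n - 1) true).map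
          (fun tail => PySem.List.pyGetD seq (im.1 : Int) 0 :: tail)
      else
        (tuples (PySem.List.slice seq (some ((im.1 : Int) + 1)) none) (n - 1) false).map
          (fun tail => PySem.List.pyGetD seq (im.1 : Int) 0 :: tail))
termination_by seq.length
decreasing_by
  · exact pv_len_remove seq im.1 (List.mem_range.mp im.2)
  · exact pv_len_tail seq im.1 (List.mem_range.mp im.2)

-- ===== PORT B =====
-- itertools.combinations(seq, k) in index-lexicographic order (itertools.permutations is PySem.List.permutations)
def pvComb : Nat → List Int → List (List Int)
  | 0, _ => [[]]
  | _ + 1, [] => []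
  | k + 1, x :: xs => (pvComb k xs).map (fun t => x :: t) ++ pvComb (k + 1) xs

def tuples_alt (seq : List Int) (n : Int) (with_permutations : Bool) : List (List Int) :=
  if n < 1 ∨ n > (seq.length : Int) then []
  else if with_permutations then PySem.List.permutations seq n.toNat
  else pvComb n.toNat seq

-- ===== PRECONDITION & SPEC =====
def Spec_tuples (seq : List Int) (n : Int) (with_permutations : Bool) (out : List (List Int)) : Prop := out = tuples_alt seq n with_permutations
instance (seq : List Int) (n : Int) (with_permutations : Bool) (out : List (List Int)) : Decidable (Spec_tuples seq n with_permutations out) := by unfold Spec_tuples; infer_instance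

-- ===== CLAIM (what is proved, stated in full; the proofs are below) =====
def Claim_equal_tuples : Prop := ∀ (seq : List Int) (n : Int) (with_permutations : Bool), Dom_tuples seq n with_permutations → Spec_tuples seq n with_permutations (tuples seq n with_permutations)

-- ===== LEMMAS AND PROOFS =====

-- unfolding equation for the port of A with the .attach bookkeeping removed
theorem tuples_eq (seq : List Int) (n : Int) (wp : Bool) :
    tuples seq n wp =
      if n > (seq.length : Int) then []
      else if n = 1 then seq.map (fun e => [e])
      else
        (List.range seq.length).flatMap (fun (i : Nat) =>
          if wp then
            (tuples (PySem.List.slice seq none (some (i : Int)) ++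
                     PySem.List.slice seq (some ((i : Int) + 1)) none) (n - 1) true).map
              (fun tail => PySem.List.pyGetD seq (i : Int) 0 :: tail)
          else
            (tuples (PySem.List.slice seq (some ((i : Int) + 1)) none) (n - 1) false).map
              (fun tail => PySem.List.pyGetD seq (i : Int) 0 :: tail)) := by
  rw [tuples]
  simp only [PySem.List.pyGetD_natCast, List.getD_eq_getElem?_getD, List.attach, List.mem_range,
    List.flatMap_subtype, List.unattach_attachWith]

theorem pv_flatMap_congr {α β : Type} (l : List α) (f g : α → List β)
    (h : ∀ x ∈ l, f x = g x) : l.flatMap f = l.flatMap g := by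
  induction l with
  | nil => rfl
  | cons x xs ih =>
    simp only [List.flatMap_cons]
    rw [h x (by simp), ih (fun y hy => h y (by simp [hy]))]

-- A yields nothing for n ≤ 0 (the recursion bottoms out on the empty list)
theorem tuples_nonpos (m : Nat) : ∀ (seq : List Int), seq.length ≤ m →
    ∀ (n : Int) (wp : Bool), n ≤ 0 → tuples seq n wp = [] := by
  induction m with
  | zero =>
    intro seq hs n wp hn
    have h0 : seq = [] := List.eq_nil_of_length_eq_zero (Nat.le_zero.mp hs)
    subst h0
    rw [tuples_eq, if_neg (by simp; omega), if_neg (by omega)]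
    simp
  | succ m ih =>
    intro seq hs n wp hn
    rw [tuples_eq, if_neg (by omega), if_neg (by omega)]
    simp only [List.flatMap_eq_nil_iff]
    intro i hi
    have hi' : i < seq.length := List.mem_range.mp hi
    have h1 : (PySem.List.slice seq none (some (i : Int)) ++
        PySem.List.slice seq (some ((i : Int) + 1)) none).length ≤ m := by
      have := pv_len_remove seq i hi'; omega
    have h2 : (PySem.List.slice seq (some ((i : Int) + 1)) none).length ≤ m := by
      have := pv_len_tail seq i hi'; omega
    cases wp with
    | true =>
      rw [if_pos rfl, ih _ h1 (n - 1) true (by omega)]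
      rfl
    | false =>
      rw [if_neg (by simp), ih _ h2 (n - 1) false (by omega)]
      rfl

theorem perm_len_lt (r : Nat) : ∀ (xs : List Int), xs.length < r →
    PySem.List.permutations xs r = [] := by
  induction r with
  | zero => intro xs h; omega
  | succ r ih =>
    intro xs h
    rw [PySem.List.permutations]
    simp only [List.flatMap_eq_nil_iff]
    intro i hi
    have hi' : i < xs.length := List.mem_range.mp hi
    rw [List.getElem?_eq_getElem hi']
    have hlen : (xs.eraseIdx i).length < r := by
      rw [List.length_eraseIdx_of_lt hi']; omega
    simp [ih _ hlen]

theorem comb_len_lt (xs : List Int) : ∀ (k : Nat), xs.length < k → pvComb k xs = [] := by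
  induction xs with
  | nil =>
    intro k h
    cases k with
    | zero => omega
    | succ k => rfl
  | cons x xs ih =>
    intro k h
    cases k with
    | zero => omega
    | succ k =>
      simp only [List.length_cons] at h
      simp [pvComb, ih k (by omega), ih (k + 1) (by omega)]

theorem pv_map_range_getD (xs : List Int) (f : Int → List Int) :
    (List.range xs.length).map (fun i => f (xs.getD i 0)) = xs.map f := by
  apply List.ext_getElem
  · simp
  · intro i h1 h2
    simp only [List.getElem_map, List.getElem_range]
    rw [List.getD_eq_getElem xs 0 (by simpa using h1)]

theorem perm_one (xs : List Int) : PySem.List.permutations xs 1 = xs.map (fun e => [e]) := by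
  rw [PySem.List.permutations]
  rw [← pv_map_range_getD xs (fun e => [e]), List.map_eq_flatMap]
  apply pv_flatMap_congr
  intro i hi
  have hi' : i < xs.length := List.mem_range.mp hi
  rw [List.getElem?_eq_getElem hi']
  rw [List.getD_eq_getElem xs 0 hi']
  simp [PySem.List.permutations]

theorem comb_one (xs : List Int) : pvComb 1 xs = xs.map (fun e => [e]) := by
  induction xs with
  | nil => rfl
  | cons x xs ih => simp [pvComb, ih]

theorem comb_flatMap (k : Nat) (xs : List Int) :
    pvComb (k + 1) xs = (List.range xs.length).flatMap
      (fun i => (pvComb k (xs.drop (i + 1))).map (fun t => xs.getD i 0 :: t)) := by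
  induction xs with
  | nil => rfl
  | cons x xs ih =>
    simp only [List.length_cons, List.range_succ_eq_map, List.flatMap_cons, List.flatMap_map]
    rw [pvComb]
    congr 1

-- A with with_permutations=True computes itertools.permutations(seq, k+1)
theorem tuples_perm (k : Nat) : ∀ (seq : List Int),
    tuples seq ((k : Int) + 1) true = PySem.List.permutations seq (k + 1) := by
  induction k with
  | zero =>
    intro seq
    simp only [Nat.cast_zero, zero_add]
    rw [tuples_eq, perm_one]
    by_cases h : (1 : Int) > (seq.length : Int)
    · obtain rfl : seq = [] := List.eq_nil_of_length_eq_zero (by omega)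
      simp
    · rw [if_neg h, if_pos rfl]
  | succ k ih =>
    intro seq
    rw [tuples_eq]
    by_cases h : (((k + 1 : Nat) : Int) + 1) > (seq.length : Int)
    · rw [if_pos h, perm_len_lt (k + 2) seq (by push_cast at h; omega)]
    · rw [if_neg h, if_neg (by push_cast; omega)]
      rw [PySem.List.permutations]
      apply pv_flatMap_congr
      intro i hi
      have hi' : i < seq.length := List.mem_range.mp hi
      rw [if_pos rfl]
      rw [List.getElem?_eq_getElem hi']
      have harg : ((k + 1 : Nat) : Int) + 1 - 1 = (k : Int) + 1 := by push_cast; ring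
      rw [harg, ih]
      rw [PySem.List.slice_to seq (by positivity), PySem.List.slice_from seq (by positivity)]
      have hto : ((i : Int)).toNat = i := by omega
      have hfrom : ((i : Int) + 1).toNat = i + 1 := by omega
      rw [hto, hfrom, ← List.eraseIdx_eq_take_drop_succ]
      rw [PySem.List.pyGetD_natCast, List.getD_eq_getElem seq 0 hi']

-- A with with_permutations=False computes itertools.combinations(seq, k+1)
theorem tuples_comb (k : Nat) : ∀ (seq : List Int),
    tuples seq ((k : Int) + 1) false = pvComb (k + 1) seq := by
  induction k with
  | zero =>
    intro seq
    simp only [Nat.cast_zero, zero_add]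
    rw [tuples_eq, comb_one]
    by_cases h : (1 : Int) > (seq.length : Int)
    · obtain rfl : seq = [] := List.eq_nil_of_length_eq_zero (by omega)
      simp
    · rw [if_neg h, if_pos rfl]
  | succ k ih =>
    intro seq
    rw [tuples_eq]
    by_cases h : (((k + 1 : Nat) : Int) + 1) > (seq.length : Int)
    · rw [if_pos h, comb_len_lt seq (k + 2) (by push_cast at h; omega)]
    · rw [if_neg h, if_neg (by push_cast; omega)]
      rw [comb_flatMap (k + 1) seq]
      apply pv_flatMap_congr
      intro i hi
      have hi' : i < seq.length := List.mem_range.mp hi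
      rw [if_neg (by simp)]
      have harg : ((k + 1 : Nat) : Int) + 1 - 1 = (k : Int) + 1 := by push_cast; ring
      rw [harg, ih]
      rw [PySem.List.slice_from seq (by positivity)]
      have hfrom : ((i : Int) + 1).toNat = i + 1 := by omega
      rw [hfrom, PySem.List.pyGetD_natCast, List.getD_eq_getElem seq 0 hi']

-- ===== VERDICT (by name: the statement is the Claim_ definition above) =====
theorem tuples_spec : Claim_equal_tuples := by
  intro seq n wp _
  unfold Spec_tuples tuples_alt
  by_cases hn : n < 1
  · rw [if_pos (Or.inl hn), tuples_nonpos seq.length seq le_rfl n wp (by omega)]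
  · by_cases hg : n > (seq.length : Int)
    · rw [if_pos (Or.inr hg), tuples_eq, if_pos hg]
    · rw [if_neg (by omega)]
      obtain ⟨k, hk⟩ : ∃ k : Nat, n = (k : Int) + 1 := ⟨(n - 1).toNat, by omega⟩
      have hnt : n.toNat = k + 1 := by omega
      subst hk
      rw [hnt]
      cases wp with
      | true => rw [if_pos rfl]; exact tuples_perm k seq
      | false => rw [if_neg (by simp)]; exact tuples_comb k seq
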